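-- pv_equiv track=rewrite | github.com/avanpo/cryptobin | language/anagram.py | search_subsets
-- ===== SOURCE A (Python) =====
-- import itertools
--
-- def search_subsets(anagrams, data):
--     """Search anagrams for possible subset matches."""
--     sols = set()
--     for s in itertools.chain.from_iterable(
--             itertools.combinations(sorted(data), r)
--             for r in range(len(data) + 1, 1, -1)):
--         # itertools.combinations keeps the order of the input, so this output
--         # is sorted.
--         sorted_str = "".join(s)
--         if sorted_str in anagrams:
--             sols.add(sorted_str)
--     return sorted(sols, key=lambda x: (-len(x), x))
-- ===== SOURCE B (Python) =====
-- def _counts(s):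
--     d = {}
--     for ch in s:
--         d[ch] = d.get(ch, 0) + 1
--     return d
--
--
-- def search_subsets(anagrams, data):
--     """Search anagrams for possible subset matches."""
--     dc = _counts(data)
--     sols = set()
--     for a in anagrams:
--         if len(a) >= 2 and list(a) == sorted(a) \
--                 and all(n <= dc.get(ch, 0) for ch, n in _counts(a).items()):
--             sols.add(a)
--     return sorted(sols, key=lambda x: (-len(x), x))
-- ===== Notes on version B (the rewrite author's own statement) =====
-- stated objective: faster
-- what changed: Instead of enumerating all 2^n character combinations of data and testing each joined string for membership in anagrams, B scans the anagram list once and keeps the entries that are sorted strings of length >= 2 whose character counts are dominated by data's character counts (one precomputed count dict).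
import Mathlib
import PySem

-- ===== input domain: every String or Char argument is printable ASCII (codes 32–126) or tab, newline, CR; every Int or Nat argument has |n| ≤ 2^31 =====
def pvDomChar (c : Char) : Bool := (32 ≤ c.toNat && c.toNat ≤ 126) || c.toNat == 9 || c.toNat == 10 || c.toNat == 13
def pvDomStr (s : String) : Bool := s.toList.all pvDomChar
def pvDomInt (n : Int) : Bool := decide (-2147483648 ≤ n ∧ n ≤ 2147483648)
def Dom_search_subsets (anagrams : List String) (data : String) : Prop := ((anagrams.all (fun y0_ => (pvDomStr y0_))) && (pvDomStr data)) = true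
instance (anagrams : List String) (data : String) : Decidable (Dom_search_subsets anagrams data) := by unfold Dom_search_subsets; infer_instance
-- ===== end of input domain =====

-- B replaces A's exponential enumeration of all character combinations of `data` by a single
-- scan of `anagrams` testing sortedness and character-count domination (objective: faster).

-- ===== PORT A =====
-- Python's combinations of sorted(data) are tuples of 1-char strings joined by ""; here
-- they are the List Char combinations, joined by String.ofList (exact on these values).
def search_subsets (anagrams : List String) (data : String) : List String :=
  let sols : PySem.Set String :=
    ((PySem.List.pyRange (PySem.Str.len data + 1) 1 (-1)).flatMap
        (fun r => PySem.List.combinations (PySem.List.sorted data.toList (fun c => c) false) r.toNat)).foldl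
      (fun sols s =>
        let sorted_str := String.ofList s
        if anagrams.contains sorted_str then sols.add sorted_str else sols)
      PySem.Set.empty
  PySem.List.sorted2 sols (fun x => -(PySem.Str.len x)) (fun x => x) false

-- ===== PORT B =====
-- _counts(s) of Source B: the dict-building loop d[ch] = d.get(ch, 0) + 1
def pyCounts (s : String) : PySem.Dict Char Int :=
  s.toList.foldl (fun d ch => d.insert ch (d.getD ch 0 + 1)) PySem.Dict.empty

def search_subsets_alt (anagrams : List String) (data : String) : List String :=
  let dc := pyCounts data
  let sols : PySem.Set String :=
    anagrams.foldl (fun sols a =>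
      if decide (2 ≤ PySem.Str.len a)
          && (a.toList == PySem.List.sorted a.toList (fun c => c) false)
          && (pyCounts a).items.all (fun p => decide (p.2 ≤ dc.getD p.1 0))
      then sols.add a else sols) PySem.Set.empty
  PySem.List.sorted2 sols (fun x => -(PySem.Str.len x)) (fun x => x) false

-- ===== PRECONDITION & SPEC =====
def Spec_search_subsets (anagrams : List String) (data : String) (out : List String) : Prop := out = search_subsets_alt anagrams data
instance (anagrams : List String) (data : String) (out : List String) : Decidable (Spec_search_subsets anagrams data out) := by unfold Spec_search_subsets; infer_instance

-- ===== CLAIM (what is proved, stated in full; the proofs are below) =====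
def Claim_equal_search_subsets : Prop := ∀ (anagrams : List String) (data : String), Dom_search_subsets anagrams data → Spec_search_subsets anagrams data (search_subsets anagrams data)

-- ===== LEMMAS AND PROOFS =====

-- membership in an "if p then add else skip" accumulation loop
theorem mem_foldl_addIf {β : Type} (f : β → String) (p : β → Bool) (L : List β)
    (s0 : PySem.Set String) (x : String) :
    (x ∈ L.foldl (fun s b => if p b then s.add (f b) else s) s0) ↔
      x ∈ s0 ∨ ∃ b ∈ L, p b = true ∧ f b = x := by
  induction L generalizing s0 with
  | nil => simp
  | cons h t ih =>
    by_cases hp : p h = true <;>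
      simp [List.foldl_cons, hp, ih, PySem.Set.mem_add] <;> tauto

theorem nodup_foldl_addIf {β : Type} (f : β → String) (p : β → Bool) (L : List β)
    (s0 : PySem.Set String) (h0 : s0.Nodup) :
    (L.foldl (fun s b => if p b then s.add (f b) else s) s0).Nodup := by
  induction L generalizing s0 with
  | nil => exact h0
  | cons h t ih =>
    by_cases hp : p h = true <;> simp [List.foldl_cons, hp]
    · exact ih _ (PySem.Set.nodup_add _ _ h0)
    · exact ih _ h0

-- sorted(xs, key=lambda x: (-len(x), x)) as a single-key sort into the lexicographic order
theorem sorted2_eq_sorted_lex (xs : List String) :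
    PySem.List.sorted2 xs (fun x => -(PySem.Str.len x)) (fun x => x) false =
      PySem.List.sorted xs (fun x => toLex (-(PySem.Str.len x), x)) false := by
  simp only [PySem.List.sorted2, PySem.List.sorted]
  congr 1
  funext acc x
  congr 1
  funext a b
  rcases Nat.lt_trichotomy a.length b.length with h1 | h1 | h1
  · simp [Prod.Lex.lt_iff, h1, Nat.lt_asymm h1, Nat.ne_of_lt h1]
  · simp [Prod.Lex.lt_iff, h1]
  · simp [Prod.Lex.lt_iff, h1, Nat.lt_asymm h1]

theorem key_lex_injective :
    Function.Injective (fun x : String => toLex (-(PySem.Str.len x), x)) := by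
  intro a b h
  simpa using congrArg (fun p : Lex (Int × String) => (ofLex p).2) h

-- characterization of A's accumulated set
theorem mem_setA (anagrams : List String) (data : String) (x : String) :
    (x ∈ ((PySem.List.pyRange (PySem.Str.len data + 1) 1 (-1)).flatMap
        (fun r => PySem.List.combinations (PySem.List.sorted data.toList (fun c => c) false) r.toNat)).foldl
      (fun sols s =>
        let sorted_str := String.ofList s
        if anagrams.contains sorted_str then sols.add sorted_str else sols)
      PySem.Set.empty) ↔
      x ∈ anagrams ∧ 2 ≤ x.toList.length ∧
        x.toList.Sublist (PySem.List.sorted data.toList (fun c => c) false) := by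
  refine Iff.trans (mem_foldl_addIf (fun s => String.ofList s)
    (fun s => anagrams.contains (String.ofList s)) _ _ x) ?_
  simp only [PySem.Set.empty, List.not_mem_nil, false_or, List.mem_flatMap,
    PySem.List.mem_combinations_iff, PySem.List.mem_pyRange_neg_one,
    List.contains_iff_mem, String.ofList_eq, PySem.Str.len_eq]
  constructor
  · rintro ⟨c, ⟨r, ⟨h1r, hrn⟩, hsub, hlen⟩, hmem, hc⟩
    subst hc
    rw [String.ofList_toList] at hmem
    exact ⟨hmem, by omega, hsub⟩
  · rintro ⟨hmem, hlen, hsub⟩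
    refine ⟨x.toList, ⟨(x.toList.length : Int), ⟨by omega, ?_⟩, hsub, by omega⟩, ?_, ?_⟩
    · have := hsub.length_le
      rw [PySem.List.length_sorted] at this
      omega
    · rwa [String.ofList_toList]
    · rfl

theorem pyCounts_eq_counter (s : String) : pyCounts s = PySem.Dict.counter s.toList :=
  PySem.Dict.foldl_insert_getD_add_one_eq_counter _

-- a sorted list of chars is a sublist of sorted(data) iff its counts are dominated by data's
theorem sorted_sub_iff (data : String) (c : List Char) :
    (c = PySem.List.sorted c (fun x => x) false ∧
      ∀ k ∈ c, c.count k ≤ data.toList.count k) ↔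
      c.Sublist (PySem.List.sorted data.toList (fun x => x) false) := by
  constructor
  · rintro ⟨hs, hcnt⟩
    have hsub : c.Subperm data.toList := List.subperm_ext_iff.2 hcnt
    have hsub2 : c.Subperm (PySem.List.sorted data.toList (fun x => x) false) :=
      hsub.trans (PySem.List.sorted_perm data.toList (fun x => x) false).symm.subperm
    have hp1 : c.Pairwise (· ≤ ·) := by
      rw [hs]; exact PySem.List.sorted_pairwise c (fun x => x)
    have hp2 : (PySem.List.sorted data.toList (fun x => x) false).Pairwise (· ≤ ·) :=
      PySem.List.sorted_pairwise data.toList (fun x => x)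
    exact List.sublist_of_subperm_of_pairwise hsub2 hp1 hp2
  · intro h
    refine ⟨(PySem.List.sorted_eq_self_of_pairwise c (fun x => x)
      ((PySem.List.sorted_pairwise data.toList (fun x => x)).sublist h)).symm, fun k _ => ?_⟩
    calc c.count k ≤ (PySem.List.sorted data.toList (fun x => x) false).count k :=
          h.count_le k
      _ = data.toList.count k := (PySem.List.sorted_perm data.toList (fun x => x) false).count_eq k

-- B's filter condition characterized
theorem predB_iff (data x : String) :
    ((decide (2 ≤ PySem.Str.len x)
        && (x.toList == PySem.List.sorted x.toList (fun c => c) false)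
        && (pyCounts x).items.all (fun p => decide (p.2 ≤ (pyCounts data).getD p.1 0))) = true) ↔
      2 ≤ x.toList.length ∧
        x.toList.Sublist (PySem.List.sorted data.toList (fun c => c) false) := by
  rw [← sorted_sub_iff data x.toList]
  simp only [pyCounts_eq_counter, PySem.Dict.items_counter, PySem.Dict.getD_counter,
    List.all_map, Bool.and_eq_true, decide_eq_true_eq, beq_iff_eq, List.all_eq_true,
    Function.comp, PySem.Set.mem_ofList, PySem.Str.len_eq, Nat.cast_le]
  constructor
  · rintro ⟨⟨h1, h2⟩, h3⟩
    exact ⟨by omega, h2, fun k hk => by exact_mod_cast h3 k hk⟩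
  · rintro ⟨h1, h2, h3⟩
    exact ⟨⟨by omega, h2⟩, fun k hk => by exact_mod_cast h3 k hk⟩

-- characterization of B's accumulated set
theorem mem_setB (anagrams : List String) (data : String) (x : String) :
    (x ∈ anagrams.foldl (fun sols a =>
      if decide (2 ≤ PySem.Str.len a)
          && (a.toList == PySem.List.sorted a.toList (fun c => c) false)
          && (pyCounts a).items.all (fun p => decide (p.2 ≤ (pyCounts data).getD p.1 0))
      then sols.add a else sols) PySem.Set.empty) ↔
      x ∈ anagrams ∧ 2 ≤ x.toList.length ∧
        x.toList.Sublist (PySem.List.sorted data.toList (fun c => c) false) := by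
  refine Iff.trans (mem_foldl_addIf (fun a => a) _ anagrams _ x) ?_
  simp only [PySem.Set.empty, List.not_mem_nil, false_or]
  constructor
  · rintro ⟨b, hb, hp, rfl⟩
    exact ⟨hb, (predB_iff data b).1 hp⟩
  · rintro ⟨hm, h2, h3⟩
    exact ⟨x, hm, (predB_iff data x).2 ⟨h2, h3⟩, rfl⟩

-- ===== VERDICT (by name: the statement is the Claim_ definition above) =====
theorem search_subsets_spec : Claim_equal_search_subsets := by
  intro anagrams data _dom
  unfold Spec_search_subsets search_subsets search_subsets_alt
  rw [sorted2_eq_sorted_lex, sorted2_eq_sorted_lex]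
  refine PySem.List.sorted_eq_sorted_of_perm _ _ _ key_lex_injective ?_
  refine (List.perm_ext_iff_of_nodup ?_ ?_).2 ?_
  · exact nodup_foldl_addIf _ _ _ _ List.nodup_nil
  · exact nodup_foldl_addIf _ _ _ _ List.nodup_nil
  · intro x
    rw [mem_setA anagrams data x, mem_setB anagrams data x]
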